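-- pv_equiv track=rewrite | github.com/viswajithiii/cs224n-project | scripts/ML/utils.py | search_text_in_list
-- ===== SOURCE A (Python) =====
-- def search_text_in_list(regex_sets_prefix,regex_set_exact,diff_dict):
--
--     count = 0
--     for word in diff_dict:
--         if word in regex_set_exact:
--             count += diff_dict[word]
--         else:
--             for length in range(1,len(word)+1):
--                 if word[:length] in regex_sets_prefix:
--                     count += diff_dict[word]
--                     break
--     return count
-- ===== SOURCE B (Python) =====
-- def search_text_in_list(regex_sets_prefix, regex_set_exact, diff_dict):
--     # Build a trie of the prefix strings once; mark where a prefix string ends.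
--     trie = {}
--     for p in regex_sets_prefix:
--         node = trie
--         for ch in p:
--             node = node.setdefault(ch, {})
--         node[''] = True  # terminal mark
--     exact = set(regex_set_exact)
--
--     def has_prefix(word):
--         node = trie
--         for ch in word:
--             if ch not in node:
--                 return False
--             node = node[ch]
--             if '' in node:
--                 return True
--         return False
--
--     total = 0
--     for word, v in diff_dict.items():
--         if word in exact or has_prefix(word):
--             total += v
--     return total
-- ===== Notes on version B (the rewrite author's own statement) =====
-- stated objective: alternative
-- what changed: B builds a trie of the prefix strings once and walks each word through it character by character (exact matches via a set), instead of A's per-word loop over every slice length with a membership scan of the prefix list at each length; measured run time is comparable (the trie walk is pure Python while A's scans are C-level), so no speed is claimed.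
import Mathlib
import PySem

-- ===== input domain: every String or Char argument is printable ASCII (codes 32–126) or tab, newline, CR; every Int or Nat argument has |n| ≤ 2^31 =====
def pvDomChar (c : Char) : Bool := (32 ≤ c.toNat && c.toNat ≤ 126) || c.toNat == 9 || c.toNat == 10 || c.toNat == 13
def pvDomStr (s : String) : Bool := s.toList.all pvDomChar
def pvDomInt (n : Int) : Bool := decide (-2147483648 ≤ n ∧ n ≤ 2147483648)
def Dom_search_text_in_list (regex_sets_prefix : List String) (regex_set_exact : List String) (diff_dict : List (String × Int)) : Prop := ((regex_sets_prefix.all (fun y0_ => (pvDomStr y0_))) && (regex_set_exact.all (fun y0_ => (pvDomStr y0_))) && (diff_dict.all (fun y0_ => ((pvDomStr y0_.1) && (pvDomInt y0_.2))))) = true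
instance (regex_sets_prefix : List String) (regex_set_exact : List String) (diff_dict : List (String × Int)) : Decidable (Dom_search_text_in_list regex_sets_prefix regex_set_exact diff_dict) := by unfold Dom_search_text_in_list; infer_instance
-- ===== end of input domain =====

-- B replaces A's per-word scan over all slice lengths (each probed against the prefix list) by a
-- trie of the prefix strings walked once per word, and sums over the dict's items in one pass.

-- ===== PORT A =====
-- inner loop 'for length in range(1, len(word)+1): if word[:length] in regex_sets_prefix: …; break'
def stilInner (regex_sets_prefix : List String) (word : String) : List Int → Bool
  | [] => false
  | l :: ls =>
    if regex_sets_prefix.contains (PySem.Str.slice word none (some l)) then true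
    else stilInner regex_sets_prefix word ls

-- the parameter diff_dict is a Python dict; PySem.Dict.ofList models it from the association list
def search_text_in_list (regex_sets_prefix : List String) (regex_set_exact : List String) (diff_dict : List (String × Int)) : Int :=
  (PySem.Dict.ofList diff_dict).keys.foldl
    (fun count word =>
      if regex_set_exact.contains word then count + (PySem.Dict.ofList diff_dict).getD word 0
      else if stilInner regex_sets_prefix word (PySem.List.pyRange 1 (PySem.Str.len word + 1)) then
        count + (PySem.Dict.ofList diff_dict).getD word 0
      else count)
    0

-- ===== PORT B =====
-- the dict-of-dicts trie, in first-child/next-sibling form: node (edge char) (terminal mark '' ) (children) (next sibling);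
-- a value of PTrie is one sibling chain (a forest).  The root's own terminal mark (set by inserting the
-- empty string) is never read by the walk, so the port keeps only the root's child forest.
inductive PTrie where
  | nil : PTrie
  | node : Char → Bool → PTrie → PTrie → PTrie
deriving DecidableEq, Repr

-- 'node = node.setdefault(ch, {}) … ; node[''] = True' threaded down one string
def ptrieIns : List Char → PTrie → PTrie
  | [], f => f
  | c :: rest, PTrie.nil => PTrie.node c rest.isEmpty (ptrieIns rest PTrie.nil) PTrie.nil
  | c :: rest, PTrie.node c' t kids sib =>
    if c = c' then PTrie.node c' (t || rest.isEmpty) (ptrieIns rest kids) sib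
    else PTrie.node c' t kids (ptrieIns (c :: rest) sib)
termination_by cs f => sizeOf cs + sizeOf f

-- 'for ch in word: if ch not in node: return False; node = node[ch]; if '' in node: return True'
def ptrieWalk : List Char → PTrie → Bool
  | [], _ => false
  | _ :: _, PTrie.nil => false
  | c :: rest, PTrie.node c' t kids sib =>
    if c = c' then t || ptrieWalk rest kids
    else ptrieWalk (c :: rest) sib
termination_by cs f => sizeOf cs + sizeOf f

def search_text_in_list_alt (regex_sets_prefix : List String) (regex_set_exact : List String) (diff_dict : List (String × Int)) : Int :=
  (PySem.Dict.ofList diff_dict).items.foldl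
    (fun total wv =>
      if (PySem.Set.ofList regex_set_exact).contains wv.1 ||
          ptrieWalk wv.1.toList (regex_sets_prefix.foldl (fun f q => ptrieIns q.toList f) PTrie.nil) then
        total + wv.2
      else total)
    0

-- ===== PRECONDITION & SPEC =====
def Spec_search_text_in_list (regex_sets_prefix : List String) (regex_set_exact : List String) (diff_dict : List (String × Int)) (out : Int) : Prop := out = search_text_in_list_alt regex_sets_prefix regex_set_exact diff_dict
instance (regex_sets_prefix : List String) (regex_set_exact : List String) (diff_dict : List (String × Int)) (out : Int) : Decidable (Spec_search_text_in_list regex_sets_prefix regex_set_exact diff_dict out) := by unfold Spec_search_text_in_list; infer_instance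

-- ===== CLAIM (what is proved, stated in full; the proofs are below) =====
def Claim_equal_search_text_in_list : Prop := ∀ (regex_sets_prefix : List String) (regex_set_exact : List String) (diff_dict : List (String × Int)), Dom_search_text_in_list regex_sets_prefix regex_set_exact diff_dict → Spec_search_text_in_list regex_sets_prefix regex_set_exact diff_dict (search_text_in_list regex_sets_prefix regex_set_exact diff_dict)

-- ===== LEMMAS AND PROOFS =====

-- proof-only helper: is the string q marked terminal in the forest f?
def ptrieHas : List Char → PTrie → Bool
  | [], _ => false
  | _ :: _, PTrie.nil => false
  | a :: b, PTrie.node c' t kids sib =>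
    if a = c' then (if b.isEmpty then t else ptrieHas b kids)
    else ptrieHas (a :: b) sib
termination_by cs f => sizeOf cs + sizeOf f

theorem ptrieHas_ins (s : List Char) (f : PTrie) (q : List Char) :
    ptrieHas q (ptrieIns s f) = true ↔ (q = s ∧ s ≠ []) ∨ ptrieHas q f = true := by
  induction s, f using ptrieIns.induct generalizing q with
  | case1 f => simp [ptrieIns]
  | case2 c rest ih =>
    match q with
    | [] => simp [ptrieIns, ptrieHas]
    | a :: b =>
      by_cases hac : a = c
      · subst hac
        match b with
        | [] =>
          simp only [ptrieIns, ptrieHas, List.isEmpty_nil, if_true]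
          simp only [List.isEmpty_iff, List.cons.injEq, ne_eq, reduceCtorEq,
            not_false_iff, and_true, true_and, Bool.false_eq_true, or_false]
          constructor
          · intro h; exact h.symm
          · intro h; exact h.symm
        | x :: y =>
          simp only [ptrieIns, ptrieHas, List.isEmpty_cons,
            Bool.false_eq_true, if_false, if_true]
          rw [ih]
          simp only [ptrieHas, List.cons.injEq, ne_eq, reduceCtorEq, not_false_iff,
            and_true, true_and, Bool.false_eq_true, or_false]
          constructor
          · rintro ⟨h, -⟩; exact h
          · rintro h; exact ⟨h, by rintro rfl; cases h⟩
      · simp [ptrieIns, ptrieHas, hac]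
  | case3 rest c' t kids sib ih =>
    match q with
    | [] => simp [ptrieIns, ptrieHas]
    | a :: b =>
      by_cases hac : a = c'
      · subst hac
        match b with
        | [] =>
          simp only [ptrieIns, ptrieHas, List.isEmpty_nil, if_true]
          simp only [List.isEmpty_iff, List.cons.injEq, ne_eq, reduceCtorEq,
            not_false_iff, and_true, true_and, Bool.or_eq_true]
          constructor
          · intro h; rcases h with h | h
            · right; exact h
            · left; exact h.symm
          · intro h; rcases h with h | h
            · right; exact h.symm
            · left; exact h
        | x :: y =>
          simp only [ptrieIns, ptrieHas, List.isEmpty_cons,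
            Bool.false_eq_true, if_false, if_true]
          rw [ih]
          simp only [ne_eq, List.cons_ne_nil, not_false_iff, and_true, List.cons.injEq, true_and]
          constructor
          · rintro (⟨h, -⟩ | h)
            · exact Or.inl h
            · exact Or.inr h
          · rintro (h | h)
            · exact Or.inl ⟨h, by rintro rfl; cases h⟩
            · exact Or.inr h
      · simp [ptrieIns, ptrieHas, hac]
  | case4 c rest c' t kids sib hne ih =>
    match q with
    | [] => simp [ptrieIns, ptrieHas, hne]
    | a :: b =>
      by_cases hac : a = c'
      · subst hac
        simp [ptrieIns, ptrieHas, hne, Ne.symm hne]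
      · simp only [ptrieIns, if_neg hne, ptrieHas, if_neg hac]
        rw [ih]

theorem ptrieHas_nil (q : List Char) : ptrieHas q PTrie.nil = false := by
  cases q <;> simp [ptrieHas]

theorem ptrieWalk_iff (w : List Char) (f : PTrie) :
    ptrieWalk w f = true ↔ ∃ q, q ≠ [] ∧ q <+: w ∧ ptrieHas q f = true := by
  induction f generalizing w with
  | nil =>
    cases w <;> simp [ptrieWalk, ptrieHas_nil]
  | node c' t kids sib ihk ihs =>
    match w with
    | [] =>
      simp only [ptrieWalk, Bool.false_eq_true, false_iff]
      rintro ⟨q, hq, hpre, -⟩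
      cases List.prefix_nil.mp hpre
      exact hq rfl
    | c :: rest =>
      by_cases hcc : c = c'
      · subst hcc
        simp only [ptrieWalk, if_true, Bool.or_eq_true]
        rw [ihk]
        constructor
        · rintro (ht | ⟨q, hq, hpre, hhas⟩)
          · exact ⟨[c], by simp, by simp, by simp [ptrieHas, ht]⟩
          · exact ⟨c :: q, by simp, by simpa using hpre,
              by simp [ptrieHas, List.isEmpty_iff, hq, hhas]⟩
        · rintro ⟨q, hq, hpre, hhas⟩
          match q, hq with
          | a :: b, _ =>
            obtain ⟨ha, hbpre⟩ : a = c ∧ b <+: rest := by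
              obtain ⟨u, hu⟩ := hpre
              cases hu
              exact ⟨rfl, ⟨u, rfl⟩⟩
            subst ha
            match b with
            | [] =>
              left
              simpa [ptrieHas] using hhas
            | x :: y =>
              right
              exact ⟨x :: y, by simp, hbpre, by simpa [ptrieHas] using hhas⟩
      · simp only [ptrieWalk, if_neg hcc]
        rw [ihs]
        constructor
        · rintro ⟨q, hq, hpre, hhas⟩
          refine ⟨q, hq, hpre, ?_⟩
          match q, hq with
          | a :: b, _ =>
            have ha : a = c := by
              obtain ⟨u, hu⟩ := hpre; cases hu; rfl
            subst ha
            simpa [ptrieHas, hcc] using hhas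
        · rintro ⟨q, hq, hpre, hhas⟩
          match q, hq with
          | a :: b, _ =>
            have ha : a = c := by
              obtain ⟨u, hu⟩ := hpre; cases hu; rfl
            subst ha
            refine ⟨a :: b, by simp, hpre, ?_⟩
            simpa [ptrieHas, hcc] using hhas

theorem ptrieHas_fold (ps : List String) (q : List Char) (f : PTrie) :
    ptrieHas q (ps.foldl (fun f t => ptrieIns t.toList f) f) = true ↔
      (q ≠ [] ∧ ∃ s ∈ ps, s.toList = q) ∨ ptrieHas q f = true := by
  induction ps generalizing f with
  | nil => simp
  | cons p ps ih =>
    simp only [List.foldl_cons, ih, ptrieHas_ins, List.mem_cons]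
    constructor
    · rintro (h | (⟨rfl, hne⟩ | h))
      · obtain ⟨hq, s, hs, rfl⟩ := h
        exact Or.inl ⟨hq, s, Or.inr hs, rfl⟩
      · refine Or.inl ⟨?_, p, Or.inl rfl, rfl⟩
        simpa using hne
      · exact Or.inr h
    · rintro (⟨hq, s, (rfl | hs), hsl⟩ | h)
      · refine Or.inr (Or.inl ⟨hsl.symm, ?_⟩)
        intro h0; apply hq; rw [← hsl, h0]
      · exact Or.inl ⟨hq, s, hs, hsl⟩
      · exact Or.inr (Or.inr h)

theorem stilInner_iff (p : List String) (w : String) (ls : List Int) :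
    stilInner p w ls = true ↔ ∃ l ∈ ls, p.contains (PySem.Str.slice w none (some l)) = true := by
  induction ls with
  | nil => simp [stilInner]
  | cons l ls ih =>
    by_cases h : p.contains (PySem.Str.slice w none (some l)) = true
    · simp only [stilInner, if_pos h]
      exact ⟨fun _ => ⟨l, by simp, h⟩, fun _ => trivial⟩
    · simp only [stilInner, if_neg h, ih, List.mem_cons]
      constructor
      · rintro ⟨x, hx, hc⟩; exact ⟨x, Or.inr hx, hc⟩
      · rintro ⟨x, (rfl | hx), hc⟩
        · exact absurd hc h
        · exact ⟨x, hx, hc⟩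

theorem cond_iff (p : List String) (w : String) :
    stilInner p w (PySem.List.pyRange 1 (PySem.Str.len w + 1)) =
      ptrieWalk w.toList (p.foldl (fun f q => ptrieIns q.toList f) PTrie.nil) := by
  rw [Bool.eq_iff_iff, stilInner_iff, ptrieWalk_iff]
  constructor
  · rintro ⟨l, hl, hc⟩
    obtain ⟨h1, h2⟩ := PySem.List.mem_pyRange_one.mp hl
    rw [PySem.Str.len_eq] at h2
    refine ⟨(PySem.Str.slice w none (some l)).toList, ?_, ?_, ?_⟩
    · rw [PySem.Str.toList_slice, PySem.Chars.slice_eq_listSlice,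
        PySem.List.slice_to _ (by omega)]
      intro hnil
      have hlen := congrArg List.length hnil
      rw [List.length_take, List.length_nil] at hlen
      omega
    · rw [PySem.Str.toList_slice, PySem.Chars.slice_eq_listSlice,
        PySem.List.slice_to _ (by omega)]
      exact List.take_prefix _ _
    · rw [ptrieHas_fold]
      refine Or.inl ⟨?_, PySem.Str.slice w none (some l), List.contains_iff_mem.mp hc, rfl⟩
      rw [PySem.Str.toList_slice, PySem.Chars.slice_eq_listSlice,
        PySem.List.slice_to _ (by omega)]
      intro hnil
      have hlen := congrArg List.length hnil
      rw [List.length_take, List.length_nil] at hlen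
      omega
  · rintro ⟨q, hq, hpre, hhas⟩
    rw [ptrieHas_fold] at hhas
    rcases hhas with ⟨-, s, hs, hsl⟩ | hnil
    · refine ⟨(q.length : Int), ?_, ?_⟩
      · rw [PySem.List.mem_pyRange_one]
        have h1 : 0 < q.length := List.length_pos_iff.mpr hq
        have h2 : q.length ≤ w.toList.length := hpre.length_le
        rw [PySem.Str.len_eq]
        omega
      · have hslice : PySem.Str.slice w none (some (q.length : Int)) = s := by
          apply String.toList_inj.mp
          rw [PySem.Str.toList_slice, PySem.Chars.slice_eq_listSlice,
            PySem.List.slice_to _ (by positivity), Int.toNat_natCast, hsl]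
          exact (List.prefix_iff_eq_take.mp hpre).symm
        rw [hslice]
        exact List.contains_iff_mem.mpr hs
    · rw [ptrieHas_nil] at hnil
      cases hnil

theorem set_contains_eq (e : List String) (w : String) :
    (PySem.Set.ofList e).contains w = e.contains w := by
  simp only [PySem.Set.contains, List.contains_eq_mem, PySem.Set.mem_ofList]

theorem fold_keys_eq_fold_items (p e : List String) (g : String → Int)
    (L : List (String × Int)) (acc : Int) (hg : ∀ wv ∈ L, g wv.1 = wv.2) :
    (L.map (fun x => x.1)).foldl
      (fun count word =>
        if e.contains word then count + g word
        else if stilInner p word (PySem.List.pyRange 1 (PySem.Str.len word + 1)) then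
          count + g word
        else count) acc
    = L.foldl
        (fun total wv =>
          if (PySem.Set.ofList e).contains wv.1 ||
              ptrieWalk wv.1.toList (p.foldl (fun f q => ptrieIns q.toList f) PTrie.nil) then
            total + wv.2
          else total) acc := by
  induction L generalizing acc with
  | nil => rfl
  | cons wv L ih =>
    have hgw : g wv.1 = wv.2 := hg wv (by simp)
    have hstep :
        (if e.contains wv.1 then acc + g wv.1
         else if stilInner p wv.1 (PySem.List.pyRange 1 (PySem.Str.len wv.1 + 1)) then
           acc + g wv.1
         else acc)
        = (if (PySem.Set.ofList e).contains wv.1 ||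
              ptrieWalk wv.1.toList (p.foldl (fun f q => ptrieIns q.toList f) PTrie.nil) then
            acc + wv.2
          else acc) := by
      rw [set_contains_eq, ← cond_iff, hgw]
      simp only [Bool.or_eq_true, List.contains_iff_mem]
      split_ifs <;> tauto
    simp only [List.map_cons, List.foldl_cons, hstep]
    exact ih _ (fun x hx => hg x (by simp [hx]))

theorem search_text_in_list_spec : Claim_equal_search_text_in_list := by
  intro p e d _
  unfold Spec_search_text_in_list search_text_in_list search_text_in_list_alt
  have hkeys : (PySem.Dict.ofList d).keys = (PySem.Dict.ofList d).items.map (fun x => x.1) := rfl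
  rw [hkeys]
  exact fold_keys_eq_fold_items p e (fun w => (PySem.Dict.ofList d).getD w 0)
    (PySem.Dict.ofList d).items 0
    (fun wv hwv => PySem.Dict.getD_of_mem_items _ (by rw [Prod.mk.eta]; exact hwv)
      (PySem.Dict.nodup_keys_ofList d) 0)
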